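-- pv_equiv track=rewrite | github.com/Gyyz/Question_Answering-over-Tabular-Data | testset_submission/test_script.py | match_string_with_column_name_list
-- ===== SOURCE A (Python) =====
-- def match_string_with_column_name_list(string, column_name_list):
--     # remove " or ' from string begin&end
--     if string[0] == string[-1] and (string[0] == '"' or string[0] == "'"):
--         string = string[1:-1]
--
--     column_name_with_no_space = [column_name.replace(' ', '') for column_name in column_name_list]  # remove space
--     string_with_no_space = string.replace(' ', '')  # remove space
--
--
--     # 1. this case is to find the space problem
--     col_index = -1
--
--     try:
--         col_index = column_name_with_no_space.index(string_with_no_space)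
--     except ValueError:
--         pass
--
--     if col_index != -1:
--         return column_name_list[col_index]
--
--     # 2. this case is to find the partial match
--     for column_name in column_name_list:
--         if string in column_name and string[0] == column_name[0]:
--             col_index = column_name_list.index(column_name)
--             break
--     if col_index != -1:
--         return column_name_list[col_index]
--     return string
-- ===== SOURCE B (Python) =====
-- def match_string_with_column_name_list(string, column_name_list):
--     # remove " or ' from string begin&end (same as the original; raises on empty string)
--     if string[0] == string[-1] and (string[0] == '"' or string[0] == "'"):
--         string = string[1:-1]
--
--     target = string.replace(' ', '')
--     partial = None
--     # one traversal: return the first space-insensitive exact match immediately,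
--     # remember the first partial match as a fallback candidate
--     for column_name in column_name_list:
--         if column_name.replace(' ', '') == target:
--             return column_name
--         if partial is None and string and string in column_name and string[0] == column_name[0]:
--             partial = column_name
--     return partial if partial is not None else string
-- ===== Notes on version B (the rewrite author's own statement) =====
-- stated objective: alternative
-- what changed: Replaces A's no-space comprehension + .index lookup + separate partial-match pass (with a second .index) by a single traversal that returns the first space-insensitive exact match immediately and records the first partial-match candidate on the way.
import Mathlib
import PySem

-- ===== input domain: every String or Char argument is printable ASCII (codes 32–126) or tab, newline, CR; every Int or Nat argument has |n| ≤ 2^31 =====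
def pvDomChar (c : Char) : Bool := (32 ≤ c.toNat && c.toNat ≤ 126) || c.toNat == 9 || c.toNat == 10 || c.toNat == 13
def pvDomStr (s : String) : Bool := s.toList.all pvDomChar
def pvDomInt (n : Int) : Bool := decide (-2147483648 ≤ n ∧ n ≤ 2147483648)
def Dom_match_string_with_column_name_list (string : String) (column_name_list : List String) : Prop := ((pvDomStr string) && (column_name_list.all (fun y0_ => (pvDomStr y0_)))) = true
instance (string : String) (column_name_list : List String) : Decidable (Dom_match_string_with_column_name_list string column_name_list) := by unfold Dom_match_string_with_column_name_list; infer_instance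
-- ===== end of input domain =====

-- B replaces A's no-space comprehension + .index lookup + separate partial-match pass by a
-- single traversal keeping a partial-match candidate (objective: alternative decomposition).


-- ===== PORT A =====
-- shared quote-stripping prefix (identical first lines of both Pythons);
-- string[0]/string[-1] on "" raise in Python (excluded by Pre_), here pyGet? gives none
def pvStrip (string : String) : String :=
  if PySem.Str.pyGet? string 0 = PySem.Str.pyGet? string (-1) ∧
     (PySem.Str.pyGet? string 0 = some '"' ∨ PySem.Str.pyGet? string 0 = some '\'') then
    PySem.Str.slice string (some 1) (some (-1))
  else string

def match_string_with_column_name_list (string : String) (column_name_list : List String) : String :=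
  let string := pvStrip string
  let column_name_with_no_space := column_name_list.map (fun c => PySem.Str.replace c " " "")
  let string_with_no_space := PySem.Str.replace string " " ""
  let col_index : Int :=
    match PySem.List.index? column_name_with_no_space string_with_no_space with
    | some i => (i : Int)
    | none => -1
  if col_index ≠ -1 then PySem.List.pyGetD column_name_list col_index "" else
  -- partial-match loop with break, then column_name_list.index(column_name)
  let col_index : Int :=
    match column_name_list.find? (fun column_name =>
        PySem.Str.isIn string column_name &&
        (PySem.Str.pyGet? string 0 == PySem.Str.pyGet? column_name 0)) with
    | some c =>
      match PySem.List.index? column_name_list c with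
      | some j => (j : Int)
      | none => -1
    | none => -1
  if col_index ≠ -1 then PySem.List.pyGetD column_name_list col_index "" else string

-- ===== PORT B =====
def pvAltLoop (string target : String) (l : List String) (part : Option String) : String :=
  match l with
  | [] => part.getD string
  | c :: rest =>
    if PySem.Str.replace c " " "" = target then c
    else pvAltLoop string target rest
      (if part.isNone && !(string == "") && PySem.Str.isIn string c &&
          (PySem.Str.pyGet? string 0 == PySem.Str.pyGet? c 0) then some c else part)

def match_string_with_column_name_list_alt (string : String) (column_name_list : List String) : String :=
  let string := pvStrip string
  let target := PySem.Str.replace string " " ""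
  pvAltLoop string target column_name_list none

-- ===== PRECONDITION & SPEC =====
-- Pre_ excludes exactly the inputs where Python A raises IndexError: the empty string
-- (string[0] at the quote-stripping line), and the four strings that quote-strip to ""
-- when the list is nonempty and no column is all spaces (string[0] in the partial-match test).
def Pre_match_string_with_column_name_list (string : String) (column_name_list : List String) : Prop :=
  string ≠ "" ∧
  ¬ ((string = "\"" ∨ string = "'" ∨ string = "\"\"" ∨ string = "''") ∧
     column_name_list ≠ [] ∧ ∀ c ∈ column_name_list, PySem.Str.replace c " " "" ≠ "")
instance (string : String) (column_name_list : List String) : Decidable (Pre_match_string_with_column_name_list string column_name_list) := by unfold Pre_match_string_with_column_name_list; infer_instance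

def pvWitness_match_string_with_column_name_list : String × List String := ("col a", ["col  a", "b"])

def Spec_match_string_with_column_name_list (string : String) (column_name_list : List String) (out : String) : Prop := out = match_string_with_column_name_list_alt string column_name_list
instance (string : String) (column_name_list : List String) (out : String) : Decidable (Spec_match_string_with_column_name_list string column_name_list out) := by unfold Spec_match_string_with_column_name_list; infer_instance

-- ===== CLAIM (what is proved, stated in full; the proofs are below) =====
def Claim_equal_match_string_with_column_name_list : Prop := ∀ (string : String) (column_name_list : List String), Dom_match_string_with_column_name_list string column_name_list → Pre_match_string_with_column_name_list string column_name_list → Spec_match_string_with_column_name_list string column_name_list (match_string_with_column_name_list string column_name_list)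


-- ===== LEMMAS AND PROOFS =====

-- B's loop, characterised: first exact match wins, else the pending partial candidate,
-- else the first (nonempty-string) partial match, else the string itself.
theorem pvAltLoop_char (s t : String) (l : List String) (p : Option String) :
    pvAltLoop s t l p =
      match l.find? (fun c => PySem.Str.replace c " " "" == t) with
      | some c => c
      | none =>
        match p with
        | some q => q
        | none =>
          match l.find? (fun c => !(s == "") && PySem.Str.isIn s c &&
              (PySem.Str.pyGet? s 0 == PySem.Str.pyGet? c 0)) with
          | some c => c
          | none => s := by
  induction l generalizing p with
  | nil => cases p <;> simp [pvAltLoop]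
  | cons c rest ih =>
    by_cases he : PySem.Str.replace c " " "" = t
    · rw [pvAltLoop, if_pos he]
      simp only [List.find?_cons]
      rw [beq_iff_eq.mpr he]
    · have he2 : (PySem.Str.replace c " " "" == t) = false := beq_eq_false_iff_ne.mpr he
      cases p with
      | some q =>
        rw [pvAltLoop, if_neg he]
        simp only [Option.isNone_some, Bool.false_and, Bool.false_eq_true, if_false]
        rw [ih]
        simp only [List.find?_cons]
        rw [he2]
      | none =>
        rw [pvAltLoop, if_neg he]
        simp only [Option.isNone_none, Bool.true_and]
        by_cases hq : (!(s == "") && PySem.Str.isIn s c &&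
            (PySem.Str.pyGet? s 0 == PySem.Str.pyGet? c 0)) = true
        · rw [if_pos hq, ih]
          simp only [List.find?_cons]
          rw [hq, he2]
        · rw [if_neg hq, ih]
          simp only [List.find?_cons]
          rw [Bool.eq_false_iff.mpr hq, he2]

-- A's first pass, characterised: indexing the no-space list then reading back the column
-- is finding the first column whose no-space form equals the target.
theorem indexPass_char (t X : String) (l : List String) :
    (match PySem.List.index? (l.map (fun c => PySem.Str.replace c " " "")) t with
      | some i => PySem.List.pyGetD l (i : Int) ""
      | none => X) =
      match l.find? (fun c => PySem.Str.replace c " " "" == t) with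
      | some c => c
      | none => X := by
  induction l with
  | nil => rfl
  | cons c rest ih =>
    by_cases he : PySem.Str.replace c " " "" = t
    · rw [List.map_cons, he, PySem.List.index?_cons_self,
        List.find?_cons_of_pos (p := fun c => PySem.Str.replace c " " "" == t)
          (beq_iff_eq.mpr he)]
      simp
    · rw [List.map_cons, PySem.List.index?_cons_of_ne _ (by simpa using he),
        List.find?_cons_of_neg (p := fun c => PySem.Str.replace c " " "" == t)
          (by simp [he]), ← ih]
      cases PySem.List.index? (rest.map fun c => PySem.Str.replace c " " "") t with
      | none => rfl
      | some i =>
        simp only [Option.map_some]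
        simp only [PySem.List.pyGetD_natCast, List.getD_cons_succ]

-- A's second pass: the .index of an element of the list reads back that element.
theorem index?_read_back (l : List String) (c : String) (hc : c ∈ l) :
    (match PySem.List.index? l c with
      | some j => PySem.List.pyGetD l (j : Int) ""
      | none => "") = c := by
  cases hj : PySem.List.index? l c with
  | none => exact absurd hc ((PySem.List.index?_eq_none_iff _ _).mp hj)
  | some j =>
    obtain ⟨hlt, hget, -⟩ := PySem.List.getElem_of_index?_eq_some hj
    simp [PySem.List.pyGetD_natCast, List.getD_eq_getElem?_getD,
      List.getElem?_eq_getElem hlt, hget]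

-- quote-stripping can only produce the empty string from these four strings
theorem strip_empty_cases (string : String) (h0 : string ≠ "") (h : pvStrip string = "") :
    string = "\"" ∨ string = "'" ∨ string = "\"\"" ∨ string = "''" := by
  unfold pvStrip at h
  split at h
  case isFalse => exact absurd h h0
  case isTrue hc =>
    obtain ⟨heq, hq⟩ := hc
    rw [← String.toList_inj] at h
    rw [PySem.Str.toList_slice] at h
    simp only [PySem.Chars.slice_eq_listSlice] at h
    rw [← String.toList_inj, ← String.toList_inj, ← String.toList_inj, ← String.toList_inj]
    have h0' : string.toList ≠ [] := by
      intro hn; exact h0 (String.toList_inj.mp (by simpa using hn))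
    simp only [PySem.Str.pyGet?, PySem.Chars.pyGet?_eq_listPyGet?] at hq heq
    match hcs : string.toList, hq with
    | [], _ => exact absurd hcs h0'
    | [a], hq =>
      simp [PySem.List.pyGet?, PySem.List.pyIdx?] at hq
      rcases hq with rfl | rfl <;> decide
    | [a, b], hq =>
      rw [hcs] at heq
      simp [PySem.List.pyGet?, PySem.List.pyIdx?] at hq heq
      subst heq
      rcases hq with rfl | rfl <;> decide
    | a :: b :: c :: r, hq =>
      rw [hcs] at h
      have hl := PySem.List.length_slice (a :: b :: c :: r) 1 (-1)
      rw [h] at hl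
      simp at hl

-- A's 'col_index ≠ -1' test after the try/except, in match form
theorem ifIndex_eq (E : Option Nat) (l : List String) (X : String) :
    (if (match E with | some i => (i : Int) | none => -1) ≠ -1
     then PySem.List.pyGetD l (match E with | some i => (i : Int) | none => -1) ""
     else X) =
      match E with | some i => PySem.List.pyGetD l (i : Int) "" | none => X := by
  cases E with
  | none => simp
  | some i => simp [show ((i : Int) ≠ -1) from by omega]

theorem match_eq_alt (string : String) (column_name_list : List String)
    (h : Pre_match_string_with_column_name_list string column_name_list) :
    match_string_with_column_name_list string column_name_list =
      match_string_with_column_name_list_alt string column_name_list := by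
  obtain ⟨h0, hpre⟩ := h
  unfold match_string_with_column_name_list match_string_with_column_name_list_alt
  rw [pvAltLoop_char, ifIndex_eq, indexPass_char]
  -- reduce A's second stage
  have second :
      (if (match column_name_list.find? (fun column_name =>
              PySem.Str.isIn (pvStrip string) column_name &&
              (PySem.Str.pyGet? (pvStrip string) 0 == PySem.Str.pyGet? column_name 0)) with
            | some c =>
              match PySem.List.index? column_name_list c with
              | some j => (j : Int)
              | none => -1
            | none => -1) ≠ -1
        then PySem.List.pyGetD column_name_list
            (match column_name_list.find? (fun column_name =>
                PySem.Str.isIn (pvStrip string) column_name &&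
                (PySem.Str.pyGet? (pvStrip string) 0 == PySem.Str.pyGet? column_name 0)) with
              | some c =>
                match PySem.List.index? column_name_list c with
                | some j => (j : Int)
                | none => -1
              | none => -1) ""
        else pvStrip string) =
        match column_name_list.find? (fun column_name =>
            PySem.Str.isIn (pvStrip string) column_name &&
            (PySem.Str.pyGet? (pvStrip string) 0 == PySem.Str.pyGet? column_name 0)) with
        | some c => c
        | none => pvStrip string := by
    cases hf : column_name_list.find? (fun column_name =>
        PySem.Str.isIn (pvStrip string) column_name &&
        (PySem.Str.pyGet? (pvStrip string) 0 == PySem.Str.pyGet? column_name 0)) with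
    | none => simp
    | some c =>
      have hc : c ∈ column_name_list := List.mem_of_find?_eq_some hf
      rw [ifIndex_eq (PySem.List.index? column_name_list c) column_name_list (pvStrip string)]
      cases hj : PySem.List.index? column_name_list c with
      | none => exact absurd hc ((PySem.List.index?_eq_none_iff _ _).mp hj)
      | some j =>
        have := index?_read_back column_name_list c hc
        rw [hj] at this
        exact this
  rw [second]
  by_cases hs : pvStrip string = ""
  · -- the stripped string is empty: Pre_ forces an exact match (or an empty list)
    rcases strip_empty_cases string h0 hs with h4 | h4 | h4 | h4 <;>
    · rcases Decidable.not_and_iff_not_or_not.mp (hpre ∘ fun hrest => ⟨by simp [h4], hrest.1, hrest.2⟩) with hnil | hnsp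
      · rw [not_not.mp hnil]
        rfl
      · push Not at hnsp
        obtain ⟨c0, hc0, hc0e⟩ := hnsp
        have hfind : (column_name_list.find? (fun c =>
            PySem.Str.replace c " " "" ==
              PySem.Str.replace (pvStrip string) " " "")).isSome := by
          rw [List.find?_isSome]
          exact ⟨c0, hc0, by rw [hs]; simp [hc0e]; decide⟩
        obtain ⟨c', hc'⟩ := Option.isSome_iff_exists.mp hfind
        rw [hc']
  · -- stripped string nonempty: the two partial-match predicates coincide
    have hb : ((pvStrip string == "") = false) := by simp [hs]
    simp only [hb, Bool.not_false, Bool.true_and]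

-- ===== VERDICT (by name: the statement is the Claim_ definition above) =====
theorem match_string_with_column_name_list_spec : Claim_equal_match_string_with_column_name_list := by
  intro s l _ hpre
  exact match_eq_alt s l hpre
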